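-- pv_equiv track=rewrite | github.com/IrynaBiruk/DQ | Functions_hw.py | combine_dicts
-- ===== SOURCE A (Python) =====
-- def combine_dicts(list_of_dicts):
--     """Combines a list of dictionaries into one dictionary with unique keys."""
--     common_dict = {}
--     for idx, d in enumerate(list_of_dicts):
--         for key, value in d.items():
--             if key in common_dict and value > common_dict[key][0]:
--                 common_dict[key] = (value, idx + 1)
--             elif key not in common_dict:
--                 common_dict[key] = (value, idx + 1)
--     return common_dict
-- ===== SOURCE B (Python) =====
-- def combine_dicts(list_of_dicts):
--     """Combines a list of dictionaries into one dictionary with unique keys."""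
--     groups = {}
--     for idx, d in enumerate(list_of_dicts):
--         for key, value in d.items():
--             groups.setdefault(key, []).append((value, idx + 1))
--     return {key: max(pairs, key=lambda p: p[0]) for key, pairs in groups.items()}
-- ===== Notes on version B (the rewrite author's own statement) =====
-- stated objective: alternative
-- what changed: Replaces A's single running-max update of a result dict by a two-phase group-then-reduce: build an inverted index key -> list of (value, idx+1) pairs in encounter order, then pick per key the first maximal pair with max(pairs, key=first), which reproduces A's earliest-index-on-ties choice.
import Mathlib
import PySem

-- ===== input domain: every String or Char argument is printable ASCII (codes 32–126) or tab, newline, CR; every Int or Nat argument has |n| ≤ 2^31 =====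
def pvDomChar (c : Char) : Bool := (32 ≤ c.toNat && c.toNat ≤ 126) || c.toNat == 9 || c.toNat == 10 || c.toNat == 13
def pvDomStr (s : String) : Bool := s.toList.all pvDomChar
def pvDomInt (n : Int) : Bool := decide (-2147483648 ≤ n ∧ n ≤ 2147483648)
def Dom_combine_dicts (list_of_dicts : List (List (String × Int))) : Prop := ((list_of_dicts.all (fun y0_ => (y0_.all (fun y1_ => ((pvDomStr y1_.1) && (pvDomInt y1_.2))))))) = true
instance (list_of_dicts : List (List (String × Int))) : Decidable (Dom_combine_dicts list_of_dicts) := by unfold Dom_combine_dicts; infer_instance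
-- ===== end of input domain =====

-- B replaces A's running-max-in-a-dict scan by a group-then-reduce decomposition: first an
-- inverted index key ↦ list of (value, idx+1) pairs in encounter order, then per key the
-- first maximal pair (Python max by first component), which matches A's earliest-on-ties choice.

-- ===== PORT A =====
def combine_dicts (list_of_dicts : List (List (String × Int))) : List (String × Int × Int) :=
  (list_of_dicts.zipIdx.foldl
    (fun common di =>
      (PySem.Dict.ofList di.1).items.foldl
        (fun common kv =>
          match common.get? kv.1 with
          | some p => if kv.2 > p.1 then common.insert kv.1 (kv.2, (di.2 : Int) + 1) else common
          | none   => common.insert kv.1 (kv.2, (di.2 : Int) + 1))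
        common)
    PySem.Dict.empty).items

-- ===== PORT B =====
-- max(pairs, key=lambda p: p[0]): Python's max keeps the FIRST maximal element
def pyMaxByFst (best : Int × Int) : List (Int × Int) → Int × Int
  | [] => best
  | q :: rest => pyMaxByFst (if q.1 > best.1 then q else best) rest

def combine_dicts_alt (list_of_dicts : List (List (String × Int))) : List (String × Int × Int) :=
  let groups : PySem.Dict String (List (Int × Int)) :=
    list_of_dicts.zipIdx.foldl
      (fun g di =>
        (PySem.Dict.ofList di.1).items.foldl
          (fun g kv => g.modify kv.1 [] (· ++ [(kv.2, (di.2 : Int) + 1)])) g)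
      PySem.Dict.empty
  groups.items.map (fun kp =>
    (kp.1,
      match kp.2 with
      | [] => (0, 0)          -- unreachable: every group collects at least one pair
      | q :: rest => pyMaxByFst q rest))

-- ===== PRECONDITION & SPEC =====
def Spec_combine_dicts (list_of_dicts : List (List (String × Int))) (out : List (String × Int × Int)) : Prop := out = combine_dicts_alt list_of_dicts
instance (list_of_dicts : List (List (String × Int))) (out : List (String × Int × Int)) : Decidable (Spec_combine_dicts list_of_dicts out) := by unfold Spec_combine_dicts; infer_instance

-- ===== CLAIM (what is proved, stated in full; the proofs are below) =====
def Claim_equal_combine_dicts : Prop := ∀ (list_of_dicts : List (List (String × Int))), Dom_combine_dicts list_of_dicts → Spec_combine_dicts list_of_dicts (combine_dicts list_of_dicts)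

-- ===== LEMMAS AND PROOFS =====

-- the flattened event stream: one (key, (value, idx+1)) triple per inner-dict item
def pvEvents (list_of_dicts : List (List (String × Int))) : List (String × (Int × Int)) :=
  list_of_dicts.zipIdx.flatMap
    (fun di => (PySem.Dict.ofList di.1).items.map (fun kv => (kv.1, (kv.2, (di.2 : Int) + 1))))

-- A's per-event update
def pvStepA (d : PySem.Dict String (Int × Int)) (e : String × (Int × Int)) : PySem.Dict String (Int × Int) :=
  match d.get? e.1 with
  | some p => if e.2.1 > p.1 then d.insert e.1 e.2 else d
  | none   => d.insert e.1 e.2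

-- B's per-event update
def pvStepB (g : PySem.Dict String (List (Int × Int))) (e : String × (Int × Int)) : PySem.Dict String (List (Int × Int)) :=
  g.modify e.1 [] (· ++ [e.2])

def pvRedOpt (o : Option (Int × Int)) (vs : List (Int × Int)) : Option (Int × Int) :=
  vs.foldl (fun o q => match o with
                       | none => some q
                       | some p => if q.1 > p.1 then some q else some p) o

lemma pv_foldl_flatMap {α β γ : Type} (f : β → α → β) (g : γ → List α) (xs : List γ) (init : β) :
    (xs.flatMap g).foldl f init = xs.foldl (fun acc x => (g x).foldl f acc) init := by
  induction xs generalizing init with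
  | nil => rfl
  | cons x xs ih => simp [List.flatMap_cons, List.foldl_append, ih]

lemma pv_combine_dicts_eq (l : List (List (String × Int))) :
    combine_dicts l = ((pvEvents l).foldl pvStepA PySem.Dict.empty).items := by
  unfold combine_dicts pvEvents
  rw [pv_foldl_flatMap]
  congr 1
  apply PySem.List.foldl_congr_mem
  intro acc di _
  rw [List.foldl_map]
  rfl

lemma pv_combine_dicts_alt_eq (l : List (List (String × Int))) :
    combine_dicts_alt l = ((pvEvents l).foldl pvStepB PySem.Dict.empty).items.map
      (fun kp => (kp.1, match kp.2 with
                        | [] => ((0 : Int), (0 : Int))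
                        | q :: rest => pyMaxByFst q rest)) := by
  unfold combine_dicts_alt pvEvents
  dsimp only
  rw [pv_foldl_flatMap]
  congr 2
  apply PySem.List.foldl_congr_mem
  intro acc di _
  rw [List.foldl_map]
  rfl

lemma pv_redOpt_cons (o : Option (Int × Int)) (q : Int × Int) (vs : List (Int × Int)) :
    pvRedOpt o (q :: vs)
      = pvRedOpt (match o with
                  | none => some q
                  | some p => if q.1 > p.1 then some q else some p) vs := rfl

lemma pv_get_foldl_stepA (events : List (String × (Int × Int)))
    (d : PySem.Dict String (Int × Int)) (k : String) :
    (events.foldl pvStepA d).get? k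
      = pvRedOpt (d.get? k) ((events.filter (fun p => p.1 == k)).map (·.2)) := by
  induction events generalizing d with
  | nil => rfl
  | cons e rest ih =>
    by_cases hk : e.1 = k
    · subst hk
      simp only [List.foldl_cons, List.filter_cons, BEq.rfl, if_pos, List.map_cons]
      rw [ih, pv_redOpt_cons]
      congr 1
      unfold pvStepA
      cases hg : d.get? e.1 with
      | none => simp [PySem.Dict.get?_insert_self]
      | some p =>
        by_cases hv : e.2.1 > p.1
        · simp [hv, PySem.Dict.get?_insert_self]
        · simp [hg, hv]
    · have hb : (e.1 == k) = false := by simp [hk]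
      simp only [List.foldl_cons, List.filter_cons, hb]
      rw [ih]
      congr 1
      unfold pvStepA
      cases hg : d.get? e.1 with
      | none => exact PySem.Dict.get?_insert_of_ne d _ (fun h => hk h.symm)
      | some p =>
        by_cases hv : e.2.1 > p.1
        · simp only [hv, if_pos]
          exact PySem.Dict.get?_insert_of_ne d _ (fun h => hk h.symm)
        · simp [hv]

lemma pv_keys_foldl_stepA (events : List (String × (Int × Int)))
    (d : PySem.Dict String (Int × Int)) :
    (events.foldl pvStepA d).keys = PySem.Set.update d.keys (events.map (·.1)) := by
  induction events generalizing d with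
  | nil => rfl
  | cons e rest ih =>
    simp only [List.foldl_cons, List.map_cons, PySem.Set.update_cons]
    rw [ih]
    congr 1
    unfold pvStepA
    by_cases hc : d.contains e.1
    · have hmem : e.1 ∈ d.keys := (PySem.Dict.contains_iff_mem_keys _ _).1 hc
      cases hg : d.get? e.1 with
      | none => exact absurd hc (by simp [(PySem.Dict.get?_eq_none_iff_contains _ _).1 hg])
      | some p =>
        by_cases hv : e.2.1 > p.1
        · simp only [hv, if_pos]
          rw [PySem.Dict.keys_insert_of_contains d _ hc, PySem.Set.add_of_mem hmem]
        · simp [hv, PySem.Set.add_of_mem hmem]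
    · have hcf : d.contains e.1 = false := by simpa using hc
      have hmem : e.1 ∉ d.keys := fun h => hc ((PySem.Dict.contains_iff_mem_keys _ _).2 h)
      have hg : d.get? e.1 = none := (PySem.Dict.get?_eq_none_iff_contains _ _).2 hcf
      simp only [hg]
      rw [PySem.Dict.keys_insert_of_not_contains d _ hcf, PySem.Set.add_of_not_mem hmem]

lemma pv_nodup_keys_foldl_stepA (events : List (String × (Int × Int)))
    (d : PySem.Dict String (Int × Int)) (h : d.keys.Nodup) :
    (events.foldl pvStepA d).keys.Nodup := by
  induction events generalizing d with
  | nil => exact h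
  | cons e rest ih =>
    apply ih
    unfold pvStepA
    cases d.get? e.1 with
    | none => exact PySem.Dict.nodup_keys_insert _ _ _ h
    | some p =>
      by_cases hv : e.2.1 > p.1
      · simp only [hv, if_pos]; exact PySem.Dict.nodup_keys_insert _ _ _ h
      · simp [hv, h]

lemma pv_redOpt_some (vs : List (Int × Int)) (p : Int × Int) :
    pvRedOpt (some p) vs = some (pyMaxByFst p vs) := by
  induction vs generalizing p with
  | nil => rfl
  | cons q rest ih =>
    unfold pvRedOpt pyMaxByFst
    simp only [List.foldl_cons]
    by_cases hv : q.1 > p.1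
    · simp only [hv, if_pos]; exact ih q
    · simp only [hv, ite_false]
      exact ih p

theorem pv_main (l : List (List (String × Int))) :
    combine_dicts l = combine_dicts_alt l := by
  rw [pv_combine_dicts_eq, pv_combine_dicts_alt_eq]
  have hNA : ((pvEvents l).foldl pvStepA PySem.Dict.empty).keys.Nodup :=
    pv_nodup_keys_foldl_stepA _ _ (by simp [PySem.Dict.keys_empty])
  have hNB : ((pvEvents l).foldl pvStepB PySem.Dict.empty).keys.Nodup := by
    unfold pvStepB
    exact PySem.Dict.nodup_keys_foldl_modify_key _ _ _ _ _ (by simp [PySem.Dict.keys_empty])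
  rw [PySem.Dict.items_eq_map_keys _ hNA ((0 : Int), (0 : Int)),
      PySem.Dict.items_eq_map_keys _ hNB ([] : List (Int × Int)), List.map_map]
  have hKA : ((pvEvents l).foldl pvStepA PySem.Dict.empty).keys
      = PySem.Set.ofList ((pvEvents l).map (·.1)) := by
    rw [pv_keys_foldl_stepA]
    simp [PySem.Dict.keys_empty, PySem.Set.update_nil_left]
  have hKB : ((pvEvents l).foldl pvStepB PySem.Dict.empty).keys
      = PySem.Set.ofList ((pvEvents l).map (·.1)) := by
    unfold pvStepB
    rw [PySem.Dict.keys_foldl_modify_key]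
    simp [PySem.Dict.keys_empty, PySem.Set.update_nil_left]
  rw [hKA, hKB]
  apply List.map_congr_left
  intro k hk
  have hkmem : k ∈ (pvEvents l).map (·.1) := (PySem.Set.mem_ofList _ _).1 hk
  obtain ⟨e, he, hke⟩ := List.mem_map.1 hkmem
  have hfilter : e ∈ (pvEvents l).filter (fun p => p.1 == k) := by
    simp [List.mem_filter, he, hke]
  have hne : ((pvEvents l).filter (fun p => p.1 == k)).map (·.2) ≠ [] := by
    simp only [ne_eq, List.map_eq_nil_iff]
    exact fun h => by simp [h] at hfilter
  obtain ⟨q, rest, hqr⟩ := List.exists_cons_of_ne_nil hne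
  have hgA : ((pvEvents l).foldl pvStepA PySem.Dict.empty).getD k ((0 : Int), (0 : Int))
      = pyMaxByFst q rest := by
    rw [PySem.Dict.getD_eq_get?_getD, pv_get_foldl_stepA, PySem.Dict.get?_empty, hqr]
    show (pvRedOpt (some q) rest).getD _ = _
    rw [pv_redOpt_some]; rfl
  have hgB : ((pvEvents l).foldl pvStepB PySem.Dict.empty).getD k ([] : List (Int × Int))
      = q :: rest := by
    unfold pvStepB
    rw [PySem.Dict.getD_foldl_modify_append, PySem.Dict.getD_empty, List.nil_append, hqr]
  simp only [Function.comp, hgA, hgB]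

-- ===== VERDICT (by name: the statement is the Claim_ definition above) =====
theorem combine_dicts_spec : Claim_equal_combine_dicts := by
  intro l _
  unfold Spec_combine_dicts
  exact pv_main l
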